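-- pv_equiv track=rewrite | github.com/jw9603/Python | BaekJoon/알고리즘유형/BFS:DFS/17086.py | bfs
-- ===== SOURCE A (Python) =====
-- from collections import deque
--
-- def bfs(N, M, grid, directions):
--     queue = deque()
--     visited = [[False] * M for _ in range(N)]
--
--     for i in range(N):
--         for j in range(M):
--             if grid[i][j] == 1:
--                 queue.append((i, j, 0))
--                 visited[i][j] = True
--
--     max_distance = 0
--     while queue:
--         cur_x, cur_y, cur_d = queue.popleft()
--
--         for dx, dy in directions:
--             next_x, next_y = cur_x + dx, cur_y + dy
--
--             if 0 <= next_x < N and 0 <= next_y < M: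
--                 if not visited[next_x][next_y]:
--                     visited[next_x][next_y] = True
--                     max_distance = max(max_distance, cur_d + 1)
--                     queue.append((next_x, next_y, cur_d + 1))
--     return max_distance
-- ===== SOURCE B (Python) =====
-- def bfs(N, M, grid, directions):
--     frontier = [(i, j) for i in range(N) for j in range(M) if grid[i][j] == 1]
--     visited = set(frontier)
--     dist = 0
--     while frontier:
--         nxt = []
--         for x, y in frontier:
--             for dx, dy in directions:
--                 c = (x + dx, y + dy)
--                 if 0 <= c[0] < N and 0 <= c[1] < M and c not in visited:
--                     visited.add(c)
--                     nxt.append(c)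
--         if not nxt:
--             break
--         dist += 1
--         frontier = nxt
--     return dist
-- ===== Notes on version B (the rewrite author's own statement) =====
-- stated objective: alternative
-- what changed: Replaces the deque of (x, y, dist) triples and the NxM boolean visited matrix by a layered BFS over a coordinate set: the seed frontier is built by a comprehension, visited is a set of (x, y) pairs, waves are expanded level by level with a single distance counter, so no per-node distance is stored and no max() is taken.
import Mathlib
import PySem

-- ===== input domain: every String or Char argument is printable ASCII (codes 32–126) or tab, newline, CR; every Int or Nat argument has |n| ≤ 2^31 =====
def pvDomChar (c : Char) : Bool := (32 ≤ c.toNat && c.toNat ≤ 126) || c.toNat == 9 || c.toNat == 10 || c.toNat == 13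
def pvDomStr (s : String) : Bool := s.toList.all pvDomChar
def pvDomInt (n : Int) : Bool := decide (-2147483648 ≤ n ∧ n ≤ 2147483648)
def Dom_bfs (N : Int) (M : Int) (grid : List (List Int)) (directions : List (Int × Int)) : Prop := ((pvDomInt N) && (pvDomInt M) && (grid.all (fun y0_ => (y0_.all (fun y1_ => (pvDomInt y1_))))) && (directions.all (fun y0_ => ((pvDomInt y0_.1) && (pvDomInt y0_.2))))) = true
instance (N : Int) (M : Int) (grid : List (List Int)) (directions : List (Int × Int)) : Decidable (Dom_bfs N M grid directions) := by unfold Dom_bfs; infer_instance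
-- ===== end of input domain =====

-- B replaces A's deque of (x, y, dist) triples and N×M boolean visited matrix by a layered
-- BFS over a set of coordinate pairs with one level counter (objective: alternative).

def pvGGet (grid : List (List Int)) (i j : Int) : Int := (grid.getD i.toNat []).getD j.toNat 0

-- ===== PORT A =====
def pvVGet (vis : List (List Bool)) (x y : Int) : Bool := (vis.getD x.toNat []).getD y.toNat false
def pvVSet (vis : List (List Bool)) (x y : Int) : List (List Bool) :=
  vis.set x.toNat ((vis.getD x.toNat []).set y.toNat true)
def pvInitVis (N M : Int) : List (List Bool) :=
  (PySem.List.pyRange 0 N 1).map (fun _ => List.replicate M.toNat false)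

def bfsSeedA (N M : Int) (grid : List (List Int)) : List (Int × Int × Int) × List (List Bool) :=
  (PySem.List.pyRange 0 N 1).foldl (fun st i =>
    (PySem.List.pyRange 0 M 1).foldl (fun st j =>
      if pvGGet grid i j = 1 then (st.1 ++ [(i, j, 0)], pvVSet st.2 i j) else st) st)
    ([], pvInitVis N M)

def bfsStepA (N M x y d : Int) (st : List (List Bool) × Int × List (Int × Int × Int))
    (dir : Int × Int) : List (List Bool) × Int × List (Int × Int × Int) :=
  let nx := x + dir.1
  let ny := y + dir.2
  if 0 ≤ nx ∧ nx < N ∧ 0 ≤ ny ∧ ny < M then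
    if pvVGet st.1 nx ny = false then
      (pvVSet st.1 nx ny, max st.2.1 (d + 1), st.2.2 ++ [(nx, ny, d + 1)])
    else st
  else st

def bfsLoopA (N M : Int) (dirs : List (Int × Int)) :
    Nat → List (Int × Int × Int) → List (List Bool) → Int → Int
  | _, [], _, maxd => maxd
  | 0, _ :: _, _, maxd => maxd
  | fuel + 1, (x, y, d) :: rest, vis, maxd =>
      let st := List.foldl (bfsStepA N M x y d) (vis, maxd, rest) dirs
      bfsLoopA N M dirs fuel st.2.2 st.1 st.2.1

def bfs (N : Int) (M : Int) (grid : List (List Int)) (directions : List (Int × Int)) : Int :=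
  let s := bfsSeedA N M grid
  bfsLoopA N M directions (N.toNat * M.toNat + (N.toNat * M.toNat + 1)) s.1 s.2 0

-- ===== PORT B =====
-- the seed frontier comprehension [(i, j) for i in range(N) for j in range(M) if grid[i][j] == 1]
def bfsFrontB (N M : Int) (grid : List (List Int)) : List (Int × Int) :=
  (PySem.List.pyRange 0 N 1).flatMap (fun i =>
    ((PySem.List.pyRange 0 M 1).filter (fun j => pvGGet grid i j == 1)).map (fun j => (i, j)))

def bfsCellB (N M x y : Int) (st : PySem.Set (Int × Int) × List (Int × Int))
    (dir : Int × Int) : PySem.Set (Int × Int) × List (Int × Int) :=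
  let c : Int × Int := (x + dir.1, y + dir.2)
  if 0 ≤ c.1 ∧ c.1 < N ∧ 0 ≤ c.2 ∧ c.2 < M ∧ ¬ c ∈ st.1 then
    (PySem.Set.add st.1 c, st.2 ++ [c])
  else st

def bfsLevelB (N M : Int) (dirs : List (Int × Int)) (front : List (Int × Int))
    (st : PySem.Set (Int × Int) × List (Int × Int)) : PySem.Set (Int × Int) × List (Int × Int) :=
  front.foldl (fun st c => List.foldl (bfsCellB N M c.1 c.2) st dirs) st

def bfsLoopB (N M : Int) (dirs : List (Int × Int)) :
    Nat → List (Int × Int) → PySem.Set (Int × Int) → Int → Int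
  | _, [], _, dist => dist
  | 0, _ :: _, _, dist => dist
  | fuel + 1, c :: front, visited, dist =>
      let st := bfsLevelB N M dirs (c :: front) (visited, [])
      if st.2 = [] then dist else bfsLoopB N M dirs fuel st.2 st.1 (dist + 1)

def bfs_alt (N : Int) (M : Int) (grid : List (List Int)) (directions : List (Int × Int)) : Int :=
  let frontier := bfsFrontB N M grid
  bfsLoopB N M directions (N.toNat * M.toNat + 1) frontier (PySem.Set.ofList frontier) 0

-- ===== PRECONDITION & SPEC =====
-- Pre_ excludes exactly the inputs on which Python A raises IndexError reading grid[i][j]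
-- (M > 0 and grid smaller than the claimed N×M region); A returns normally everywhere else
-- (for M ≤ 0 the inner loop is empty and grid is never subscripted).
def Pre_bfs (N : Int) (M : Int) (grid : List (List Int)) (directions : List (Int × Int)) : Prop :=
  M ≤ 0 ∨ (N.toNat ≤ grid.length ∧ ∀ r ∈ grid.take N.toNat, M.toNat ≤ r.length)
instance (N : Int) (M : Int) (grid : List (List Int)) (directions : List (Int × Int)) : Decidable (Pre_bfs N M grid directions) := by unfold Pre_bfs; infer_instance

def pvWitness_bfs : Int × Int × List (List Int) × (List (Int × Int)) :=
  (2, 2, [[0, 1], [0, 0]], [(0, 1), (1, 0), (0, -1), (-1, 0)])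

def Spec_bfs (N : Int) (M : Int) (grid : List (List Int)) (directions : List (Int × Int)) (out : Int) : Prop := out = bfs_alt N M grid directions
instance (N : Int) (M : Int) (grid : List (List Int)) (directions : List (Int × Int)) (out : Int) : Decidable (Spec_bfs N M grid directions out) := by unfold Spec_bfs; infer_instance

-- ===== CLAIM (what is proved, stated in full; the proofs are below) =====
def Claim_equal_bfs : Prop := ∀ (N : Int) (M : Int) (grid : List (List Int)) (directions : List (Int × Int)), Dom_bfs N M grid directions → Pre_bfs N M grid directions → Spec_bfs N M grid directions (bfs N M grid directions)

-- ===== LEMMAS AND PROOFS =====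

def pvCF (vis : List (List Bool)) : Nat := (vis.map (fun r => r.count false)).sum
def pvShape (N M : Int) (vis : List (List Bool)) : Prop :=
  vis.length = N.toNat ∧ ∀ r ∈ vis, r.length = M.toNat
def pvEmb (d : Int) (p : Int × Int) : Int × Int × Int := (p.1, p.2, d)
-- the coupling between A's boolean matrix and B's coordinate set
def pvRel (N M : Int) (vis : List (List Bool)) (s : PySem.Set (Int × Int)) : Prop :=
  ∀ x y : Int, 0 ≤ x → x < N → 0 ≤ y → y < M → (pvVGet vis x y = true ↔ (x, y) ∈ s)

theorem pvShape_set (N M x y : Int) (vis : List (List Bool)) (h : pvShape N M vis) :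
    pvShape N M (pvVSet vis x y) := by
  obtain ⟨h1, h2⟩ := h
  by_cases hx : x.toNat < vis.length
  · refine ⟨by simp [pvVSet, h1], ?_⟩
    intro r hr
    rcases List.mem_or_eq_of_mem_set hr with h | h
    · exact h2 r h
    · subst h
      have := h2 vis[x.toNat] (List.getElem_mem hx)
      simp [List.getD, List.getElem?_eq_getElem hx, this]
  · have : pvVSet vis x y = vis := by
      unfold pvVSet
      exact List.set_eq_of_length_le (by omega)
    rw [this]; exact ⟨h1, h2⟩

theorem pvVGet_set_self (N M : Int) (vis : List (List Bool)) (x y : Int)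
    (hsh : pvShape N M vis) (hx0 : 0 ≤ x) (hxN : x < N) (hy0 : 0 ≤ y) (hyM : y < M) :
    pvVGet (pvVSet vis x y) x y = true := by
  obtain ⟨h1, h2⟩ := hsh
  have hk : x.toNat < vis.length := by omega
  have hl : y.toNat < (vis.getD x.toNat []).length := by
    rw [List.getD_eq_getElem vis [] hk]
    have := h2 _ (List.getElem_mem hk); omega
  unfold pvVGet pvVSet
  rw [List.getD_eq_getElem _ [] (by simpa using hk),
      List.getElem_set_self (by simpa using hk),
      List.getD_eq_getElem _ false (by simpa using hl),
      List.getElem_set_self (by simpa using hl)]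

theorem pvVGet_set_other (vis : List (List Bool)) (a b x y : Int)
    (ha : 0 ≤ a) (hb : 0 ≤ b) (hx : 0 ≤ x) (hy : 0 ≤ y) (hne : ¬(x = a ∧ y = b)) :
    pvVGet (pvVSet vis a b) x y = pvVGet vis x y := by
  unfold pvVGet pvVSet
  by_cases hrow : x.toNat = a.toNat
  · have hxa : x = a := by omega
    have hyb : y.toNat ≠ b.toNat := by
      intro h; exact hne ⟨hxa, by omega⟩
    subst hxa
    simp only [List.getD_eq_getElem?_getD, List.getElem?_set_self']
    cases h : vis[x.toNat]? with
    | none => simp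
    | some r =>
      simp [List.getElem?_set_ne (show b.toNat ≠ y.toNat by omega)]
  · simp only [List.getD_eq_getElem?_getD, List.getElem?_set_ne (by omega : a.toNat ≠ x.toNat)]

theorem pvRel_set (N M : Int) (vis : List (List Bool)) (s : PySem.Set (Int × Int)) (a b : Int)
    (hsh : pvShape N M vis) (hrel : pvRel N M vis s)
    (ha0 : 0 ≤ a) (haN : a < N) (hb0 : 0 ≤ b) (hbM : b < M) :
    pvRel N M (pvVSet vis a b) (PySem.Set.add s (a, b)) := by
  intro x y hx0 hxN hy0 hyM
  rw [PySem.Set.mem_add]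
  by_cases hxy : x = a ∧ y = b
  · obtain ⟨h1, h2⟩ := hxy; subst h1; subst h2
    simp [pvVGet_set_self N M vis x y hsh hx0 hxN hy0 hyM]
  · rw [pvVGet_set_other vis a b x y ha0 hb0 hx0 hy0 hxy, hrel x y hx0 hxN hy0 hyM]
    constructor
    · exact Or.inl
    · rintro (h | h)
      · exact h
      · exact absurd (by exact ⟨congrArg Prod.fst h, congrArg Prod.snd h⟩) hxy

theorem pvRow_count_set (r : List Bool) (l : Nat) (hl : l < r.length)
    (hf : r.getD l false = false) : (r.set l true).count false + 1 = r.count false := by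
  induction r generalizing l with
  | nil => simp at hl
  | cons a r ih =>
    cases l with
    | zero => simp_all
    | succ l =>
      simp only [List.set_cons_succ, List.count_cons]
      have := ih l (by simpa using hl) (by simpa using hf)
      omega

theorem pvRow_count_set_le (r : List Bool) (l : Nat) :
    (r.set l true).count false ≤ r.count false := by
  induction r generalizing l with
  | nil => simp
  | cons a r ih =>
    cases l with
    | zero => cases a <;> simp
    | succ l =>
      simp only [List.set_cons_succ, List.count_cons]
      have := ih l
      omega

theorem pvCF_set_nat (vis : List (List Bool)) (k l : Nat)
    (hk : k < vis.length) (hl : l < (vis.getD k []).length)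
    (hf : (vis.getD k []).getD l false = false) :
    pvCF (vis.set k ((vis.getD k []).set l true)) + 1 = pvCF vis := by
  induction vis generalizing k with
  | nil => simp at hk
  | cons a vis ih =>
    cases k with
    | zero =>
      simp only [List.getD_cons_zero] at hl hf ⊢
      simp only [List.set_cons_zero, pvCF, List.map_cons, List.sum_cons]
      have := pvRow_count_set a l hl hf
      omega
    | succ k =>
      simp only [List.getD_cons_succ] at hl hf ⊢
      simp only [List.set_cons_succ, pvCF, List.map_cons, List.sum_cons]
      have := ih k (by simpa using hk) hl hf
      unfold pvCF at this
      omega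

theorem pvCF_set_nat_le (vis : List (List Bool)) (k l : Nat) :
    pvCF (vis.set k ((vis.getD k []).set l true)) ≤ pvCF vis := by
  induction vis generalizing k with
  | nil => simp [pvCF]
  | cons a vis ih =>
    cases k with
    | zero =>
      simp only [List.getD_cons_zero, List.set_cons_zero, pvCF, List.map_cons, List.sum_cons]
      have := pvRow_count_set_le a l
      omega
    | succ k =>
      simp only [List.getD_cons_succ, List.set_cons_succ, pvCF, List.map_cons, List.sum_cons]
      have := ih k
      unfold pvCF at this
      omega

theorem pvCF_set (N M : Int) (vis : List (List Bool)) (x y : Int)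
    (hsh : pvShape N M vis) (hx0 : 0 ≤ x) (hxN : x < N) (hy0 : 0 ≤ y) (hyM : y < M)
    (hf : pvVGet vis x y = false) : pvCF (pvVSet vis x y) + 1 = pvCF vis := by
  obtain ⟨h1, h2⟩ := hsh
  have hk : x.toNat < vis.length := by omega
  have hrow : vis.getD x.toNat [] = vis[x.toNat] := List.getD_eq_getElem vis [] hk
  have hlen : (vis.getD x.toNat []).length = M.toNat := by
    rw [hrow]; exact h2 _ (List.getElem_mem hk)
  exact pvCF_set_nat vis x.toNat y.toNat hk (by omega) hf

theorem pvCF_set_le (vis : List (List Bool)) (x y : Int) :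
    pvCF (pvVSet vis x y) ≤ pvCF vis :=
  pvCF_set_nat_le vis x.toNat y.toNat

theorem pvCF_init (N M : Int) : pvCF (pvInitVis N M) = N.toNat * M.toNat := by
  unfold pvCF pvInitVis
  have h0 : (N - 0).toNat = N.toNat := by omega
  rw [List.map_map,
    show ((fun r : List Bool => r.count false) ∘ fun _ : Int => List.replicate M.toNat false)
        = fun _ : Int => M.toNat from by funext _; simp,
    List.map_const', List.sum_replicate, smul_eq_mul, PySem.List.length_pyRange_one, h0]

-- A's inner fold: the queue tail only accumulates; visited and max_distance ignore it
theorem foldA_q (N M x y d : Int) (dirs : List (Int × Int)) :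
    ∀ (vis : List (List Bool)) (maxd : Int) (q : List (Int × Int × Int)),
    List.foldl (bfsStepA N M x y d) (vis, maxd, q) dirs
      = ((List.foldl (bfsStepA N M x y d) (vis, maxd, []) dirs).1,
         (List.foldl (bfsStepA N M x y d) (vis, maxd, []) dirs).2.1,
         q ++ (List.foldl (bfsStepA N M x y d) (vis, maxd, []) dirs).2.2) := by
  induction dirs with
  | nil => intro vis maxd q; simp
  | cons dir dirs ih =>
    intro vis maxd q
    simp only [List.foldl_cons, bfsStepA, List.nil_append]
    split_ifs with h1 h2
    · rw [ih _ _ (q ++ [(x + dir.1, y + dir.2, d + 1)]),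
          ih (pvVSet vis (x + dir.1) (y + dir.2)) (max maxd (d + 1)) [(x + dir.1, y + dir.2, d + 1)]]
      simp
    · exact ih vis maxd q
    · exact ih vis maxd q

-- B's inner fold: the next-frontier list only accumulates; the visited set ignores it
theorem foldB_q (N M x y : Int) (dirs : List (Int × Int)) :
    ∀ (s : PySem.Set (Int × Int)) (acc : List (Int × Int)),
    List.foldl (bfsCellB N M x y) (s, acc) dirs
      = ((List.foldl (bfsCellB N M x y) (s, []) dirs).1,
         acc ++ (List.foldl (bfsCellB N M x y) (s, []) dirs).2) := by
  induction dirs with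
  | nil => intro s acc; simp
  | cons dir dirs ih =>
    intro s acc
    simp only [List.foldl_cons, bfsCellB, List.nil_append]
    split_ifs with h1
    · rw [ih _ (acc ++ [(x + dir.1, y + dir.2)]),
          ih (PySem.Set.add s (x + dir.1, y + dir.2)) [(x + dir.1, y + dir.2)]]
      simp
    · exact ih s acc

-- processing one popped cell in A = processing that frontier cell in B, through pvRel
theorem cellAB (N M x y d : Int) (dirs : List (Int × Int)) :
    ∀ (vis : List (List Bool)) (s : PySem.Set (Int × Int)) (maxd : Int),
    pvShape N M vis → pvRel N M vis s →
    (List.foldl (bfsStepA N M x y d) (vis, maxd, []) dirs).2.2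
        = (List.foldl (bfsCellB N M x y) (s, []) dirs).2.map (pvEmb (d + 1)) ∧
    (List.foldl (bfsStepA N M x y d) (vis, maxd, []) dirs).2.1
        = (if (List.foldl (bfsCellB N M x y) (s, []) dirs).2 = [] then maxd
           else max maxd (d + 1)) ∧
    pvShape N M (List.foldl (bfsStepA N M x y d) (vis, maxd, []) dirs).1 ∧
    pvRel N M (List.foldl (bfsStepA N M x y d) (vis, maxd, []) dirs).1
        (List.foldl (bfsCellB N M x y) (s, []) dirs).1 ∧
    pvCF (List.foldl (bfsStepA N M x y d) (vis, maxd, []) dirs).1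
        + (List.foldl (bfsCellB N M x y) (s, []) dirs).2.length ≤ pvCF vis := by
  induction dirs with
  | nil => intro vis s maxd hsh hrel; exact ⟨rfl, rfl, hsh, hrel, le_rfl⟩
  | cons dir dirs ih =>
    intro vis s maxd hsh hrel
    set nx := x + dir.1 with hnx
    set ny := y + dir.2 with hny
    by_cases hin : 0 ≤ nx ∧ nx < N ∧ 0 ≤ ny ∧ ny < M
    · obtain ⟨ha, hb, hc, hd⟩ := hin
      by_cases hv : pvVGet vis nx ny = false
      · have hmem : ¬ ((nx, ny) ∈ s) := by
          rw [← hrel nx ny ha hb hc hd]; simp [hv]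
        have hstepA : bfsStepA N M x y d (vis, maxd, []) dir
            = (pvVSet vis nx ny, max maxd (d + 1), [(nx, ny, d + 1)]) := by
          simp [bfsStepA, ← hnx, ← hny, ha, hb, hc, hd, hv]
        have hstepB : bfsCellB N M x y (s, []) dir
            = (PySem.Set.add s (nx, ny), [(nx, ny)]) := by
          simp [bfsCellB, ← hnx, ← hny, ha, hb, hc, hd, hmem]
        simp only [List.foldl_cons, hstepA, hstepB]
        rw [foldA_q, foldB_q]
        have hsh' := pvShape_set N M nx ny vis hsh
        have hrel' := pvRel_set N M vis s nx ny hsh hrel ha hb hc hd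
        have hcf := pvCF_set N M vis nx ny hsh ha hb hc hd hv
        obtain ⟨e1, e2, e3, e4, e5⟩ :=
          ih (pvVSet vis nx ny) (PySem.Set.add s (nx, ny)) (max maxd (d + 1)) hsh' hrel'
        refine ⟨by simp [e1, pvEmb], ?_, e3, e4, ?_⟩
        · rw [e2]
          by_cases hnil : (List.foldl (bfsCellB N M x y)
              (PySem.Set.add s (nx, ny), []) dirs).2 = [] <;>
            simp [hnil, max_assoc, max_self]
        · simp only [List.length_append, List.length_cons, List.length_nil]
          omega
      · have hmem : (nx, ny) ∈ s := by
          rw [← hrel nx ny ha hb hc hd]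
          cases hvg : pvVGet vis nx ny
          · exact absurd hvg hv
          · rfl
        have hstepA : bfsStepA N M x y d (vis, maxd, []) dir = (vis, maxd, []) := by
          simp [bfsStepA, ← hnx, ← hny, ha, hb, hc, hd, hv]
        have hstepB : bfsCellB N M x y (s, []) dir = (s, []) := by
          simp [bfsCellB, ← hnx, ← hny, hmem]
        simp only [List.foldl_cons, hstepA, hstepB]
        exact ih vis s maxd hsh hrel
    · have hstepA : bfsStepA N M x y d (vis, maxd, []) dir = (vis, maxd, []) := by
        simp only [bfsStepA, ← hnx, ← hny]
        rw [if_neg hin]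
      have hstepB : bfsCellB N M x y (s, []) dir = (s, []) := by
        simp only [bfsCellB, ← hnx, ← hny]
        rw [if_neg (by tauto)]
      simp only [List.foldl_cons, hstepA, hstepB]
      exact ih vis s maxd hsh hrel

-- MAIN INVARIANT: A's queue, split as current wave ++ next wave, runs like B's level loop
theorem mainS (N M : Int) (dirs : List (Int × Int)) :
    ∀ fb : Nat, ∀ cs : List (Int × Int), ∀ (fa : Nat) (ns : List (Int × Int))
      (vis : List (List Bool)) (s : PySem.Set (Int × Int)) (d : Int),
    pvShape N M vis → pvRel N M vis s →
    pvCF vis + ns.length < fb → cs.length + ns.length + pvCF vis < fa →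
    bfsLoopA N M dirs fa (cs.map (pvEmb d) ++ ns.map (pvEmb (d + 1))) vis
        (if ns = [] then d else d + 1)
      = (let st := bfsLevelB N M dirs cs (s, ns);
         if st.2 = [] then d else bfsLoopB N M dirs (fb - 1) st.2 st.1 (d + 1)) := by
  intro fb
  induction fb using Nat.strong_induction_on with
  | _ fb ihfb =>
    intro cs
    induction cs with
    | nil =>
      intro fa ns vis s d hsh hrel hfb hfa
      cases ns with
      | nil =>
        cases fa <;> simp [bfsLoopA, bfsLevelB]
      | cons n ns' =>
        have hfb2 : 2 ≤ fb := by
          simp only [List.length_cons] at hfb; omega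
        have step1 :
            bfsLoopA N M dirs fa (([] : List (Int × Int)).map (pvEmb d) ++
                (n :: ns').map (pvEmb (d + 1))) vis (if (n :: ns') = [] then d else d + 1)
            = bfsLoopA N M dirs fa ((n :: ns').map (pvEmb (d + 1)) ++
                ([] : List (Int × Int)).map (pvEmb (d + 1 + 1))) vis
                (if ([] : List (Int × Int)) = [] then d + 1 else d + 1 + 1) := by
          simp
        rw [step1, ihfb (fb - 1) (by omega) (n :: ns') fa [] vis s (d + 1) hsh hrel
            (by simp only [List.length_cons, List.length_nil] at *; omega)
            (by simp only [List.length_cons, List.length_nil] at *; omega)]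
        have hlev : bfsLevelB N M dirs [] (s, n :: ns') = (s, n :: ns') := by
          simp [bfsLevelB]
        have : ∃ f, fb - 1 = f + 1 := ⟨fb - 2, by omega⟩
        obtain ⟨f, hf⟩ := this
        simp only [hlev, hf, Nat.add_sub_cancel]
        simp [bfsLoopB, bfsLevelB]
    | cons c cs ih =>
      intro fa ns vis s d hsh hrel hfb hfa
      cases fa with
      | zero => simp at hfa
      | succ fa =>
        have hq : (c :: cs).map (pvEmb d) ++ ns.map (pvEmb (d + 1))
            = (c.1, c.2, d) :: (cs.map (pvEmb d) ++ ns.map (pvEmb (d + 1))) := by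
          simp [pvEmb]
        rw [hq]
        show bfsLoopA N M dirs (fa + 1) ((c.1, c.2, d) :: _) vis _ = _
        rw [bfsLoopA]
        rw [foldA_q]
        obtain ⟨e1, e2, e3, e4, e5⟩ :=
          cellAB N M c.1 c.2 d dirs vis s (if ns = [] then d else d + 1) hsh hrel
        set b := List.foldl (bfsCellB N M c.1 c.2) (s, []) dirs with hbdef
        set a := List.foldl (bfsStepA N M c.1 c.2 d) (vis, (if ns = [] then d else d + 1), []) dirs
          with hadef
        have hq2 : (cs.map (pvEmb d) ++ ns.map (pvEmb (d + 1))) ++ a.2.2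
            = cs.map (pvEmb d) ++ (ns ++ b.2).map (pvEmb (d + 1)) := by
          rw [e1]; simp [List.map_append]
        have hmx : a.2.1 = (if ns ++ b.2 = [] then d else d + 1) := by
          rw [e2]
          by_cases hb2 : b.2 = [] <;> by_cases hns : ns = [] <;>
            simp [hb2, hns, max_eq_right (by omega : d ≤ d + 1), max_self]
      -- dsimp the let in bfsLoopA
        simp only [hq2, hmx]
        rw [ih fa (ns ++ b.2) a.1 b.1 d e3 e4
            (by simp only [List.length_append] at *; omega)
            (by simp only [List.length_append, List.length_cons] at *; omega)]
        have hlev : bfsLevelB N M dirs (c :: cs) (s, ns)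
            = bfsLevelB N M dirs cs (b.1, ns ++ b.2) := by
          simp only [bfsLevelB, List.foldl_cons]
          rw [foldB_q, ← hbdef]
        rw [hlev]

-- ===== seed lemmas: A's seed loop vs B's comprehension + set(…) =====

-- split A's seed fold into its queue projection and a vis-only fold
theorem seedA_split (N M : Int) (grid : List (List Int)) :
    bfsSeedA N M grid = ((bfsFrontB N M grid).map (pvEmb 0),
      (PySem.List.pyRange 0 N 1).foldl (fun v i =>
        (PySem.List.pyRange 0 M 1).foldl (fun v j =>
          if pvGGet grid i j = 1 then pvVSet v i j else v) v) (pvInitVis N M)) := by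
  have inner : ∀ (i : Int) (js : List Int) (q : List (Int × Int × Int)) (v : List (List Bool)),
      List.foldl (fun st j =>
          if pvGGet grid i j = 1 then (st.1 ++ [(i, j, 0)], pvVSet st.2 i j) else st) (q, v) js
        = (q ++ ((js.filter (fun j => pvGGet grid i j == 1)).map (fun j => (i, j, 0))),
           List.foldl (fun v j => if pvGGet grid i j = 1 then pvVSet v i j else v) v js) := by
    intro i js
    induction js with
    | nil => intro q v; simp
    | cons j js ihj =>
      intro q v
      simp only [List.foldl_cons, List.filter_cons]
      by_cases h : pvGGet grid i j = 1
      · rw [if_pos h, ihj (q ++ [(i, j, 0)]) (pvVSet v i j)]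
        simp [h]
      · rw [if_neg h, ihj q v]
        simp [h]
  have outer : ∀ (is : List Int) (q : List (Int × Int × Int)) (v : List (List Bool)),
      List.foldl (fun st i =>
          (PySem.List.pyRange 0 M 1).foldl (fun st j =>
            if pvGGet grid i j = 1 then (st.1 ++ [(i, j, 0)], pvVSet st.2 i j) else st) st)
        (q, v) is
        = (q ++ (is.flatMap (fun i =>
              (((PySem.List.pyRange 0 M 1).filter (fun j => pvGGet grid i j == 1)).map
                (fun j => ((i, j) : Int × Int))).map (pvEmb 0))),
           List.foldl (fun v i =>
              (PySem.List.pyRange 0 M 1).foldl (fun v j =>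
                if pvGGet grid i j = 1 then pvVSet v i j else v) v) v is) := by
    intro is
    induction is with
    | nil => intro q v; simp
    | cons i is ihi =>
      intro q v
      simp only [List.foldl_cons]
      rw [inner i _ q v, ihi]
      simp only [List.flatMap_cons, List.append_assoc, List.map_map]
      rfl
  unfold bfsSeedA bfsFrontB
  rw [outer]
  simp [List.map_flatMap, List.map_map]

theorem pvVGet_init (N M x y : Int) : pvVGet (pvInitVis N M) x y = false := by
  unfold pvVGet pvInitVis
  simp only [List.getD_eq_getElem?_getD, List.getElem?_map]
  cases h : (PySem.List.pyRange 0 N 1)[x.toNat]? with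
  | none => simp
  | some i =>
    simp only [Option.map_some, Option.getD_some, List.getElem?_replicate]
    split <;> simp

-- each row-marking fold preserves shape; characterise its true cells
theorem rowMark_shape (N M : Int) (grid : List (List Int)) (i : Int) (js : List Int) :
    ∀ v, pvShape N M v →
    pvShape N M (List.foldl (fun v j => if pvGGet grid i j = 1 then pvVSet v i j else v) v js) := by
  induction js with
  | nil => intro v h; exact h
  | cons j js ihj =>
    intro v h
    simp only [List.foldl_cons]
    split_ifs
    · exact ihj _ (pvShape_set N M i j v h)
    · exact ihj v h

theorem rowMark_cf (N M : Int) (grid : List (List Int)) (i : Int) (js : List Int) :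
    ∀ v, pvCF (List.foldl (fun v j => if pvGGet grid i j = 1 then pvVSet v i j else v) v js)
      ≤ pvCF v := by
  induction js with
  | nil => intro v; exact le_rfl
  | cons j js ihj =>
    intro v
    simp only [List.foldl_cons]
    split_ifs
    · exact le_trans (ihj _) (pvCF_set_le v i j)
    · exact ihj v

theorem rowMark_vget (N M : Int) (grid : List (List Int)) (i : Int) (hi0 : 0 ≤ i) (hiN : i < N)
    (js : List Int) (hjs : ∀ j ∈ js, 0 ≤ j ∧ j < M) :
    ∀ v, pvShape N M v → ∀ x y : Int, 0 ≤ x → 0 ≤ y →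
    (pvVGet (List.foldl (fun v j => if pvGGet grid i j = 1 then pvVSet v i j else v) v js) x y
        = true
      ↔ pvVGet v x y = true ∨ (x = i ∧ y ∈ js ∧ pvGGet grid i y = 1)) := by
  induction js with
  | nil => intro v hsh x y hx hy; simp
  | cons j js ihj =>
    intro v hsh x y hx hy
    have hj := hjs j (by simp)
    have hjs' : ∀ j' ∈ js, 0 ≤ j' ∧ j' < M := fun j' hj' => hjs j' (by simp [hj'])
    simp only [List.foldl_cons]
    by_cases hg : pvGGet grid i j = 1
    · rw [if_pos hg,
        ihj hjs' (pvVSet v i j) (pvShape_set N M i j v hsh) x y hx hy]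
      by_cases hxy : x = i ∧ y = j
      · obtain ⟨h1, h2⟩ := hxy; subst h1; subst h2
        rw [pvVGet_set_self N M v x y hsh hx hiN hy hj.2]
        simp [hg]
      · rw [pvVGet_set_other v i j x y hi0 hj.1 hx hy hxy]
        constructor
        · rintro (h | ⟨h1, h2, h3⟩)
          · exact Or.inl h
          · exact Or.inr ⟨h1, by simp [h2], h3⟩
        · rintro (h | ⟨h1, h2, h3⟩)
          · exact Or.inl h
          · rcases List.mem_cons.mp h2 with h2 | h2
            · exact absurd ⟨h1, h2⟩ hxy
            · exact Or.inr ⟨h1, h2, h3⟩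
    · rw [if_neg hg, ihj hjs' v hsh x y hx hy]
      constructor
      · rintro (h | ⟨h1, h2, h3⟩)
        · exact Or.inl h
        · exact Or.inr ⟨h1, by simp [h2], h3⟩
      · rintro (h | ⟨h1, h2, h3⟩)
        · exact Or.inl h
        · rcases List.mem_cons.mp h2 with h2 | h2
          · subst h2; subst h1; exact absurd h3 hg
          · exact Or.inr ⟨h1, h2, h3⟩

theorem seedVis_facts (N M : Int) (grid : List (List Int)) :
    pvShape N M ((PySem.List.pyRange 0 N 1).foldl (fun v i =>
        (PySem.List.pyRange 0 M 1).foldl (fun v j =>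
          if pvGGet grid i j = 1 then pvVSet v i j else v) v) (pvInitVis N M)) ∧
    pvCF ((PySem.List.pyRange 0 N 1).foldl (fun v i =>
        (PySem.List.pyRange 0 M 1).foldl (fun v j =>
          if pvGGet grid i j = 1 then pvVSet v i j else v) v) (pvInitVis N M))
      ≤ N.toNat * M.toNat ∧
    ∀ x y : Int, 0 ≤ x → 0 ≤ y →
      (pvVGet ((PySem.List.pyRange 0 N 1).foldl (fun v i =>
          (PySem.List.pyRange 0 M 1).foldl (fun v j =>
            if pvGGet grid i j = 1 then pvVSet v i j else v) v) (pvInitVis N M)) x y = true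
        ↔ x ∈ PySem.List.pyRange 0 N 1 ∧ y ∈ PySem.List.pyRange 0 M 1 ∧ pvGGet grid x y = 1) := by
  have hinit : pvShape N M (pvInitVis N M) := by
    constructor
    · simp only [pvInitVis, List.length_map, PySem.List.length_pyRange_one]; omega
    · intro r hr
      simp only [pvInitVis, List.mem_map] at hr
      obtain ⟨_, _, hr⟩ := hr
      simp [← hr]
  have hjsM : ∀ j ∈ PySem.List.pyRange 0 M 1, 0 ≤ j ∧ j < M := by
    intro j hj
    have := PySem.List.mem_pyRange_one.mp hj
    omega
  have main : ∀ (is : List Int), (∀ i ∈ is, 0 ≤ i ∧ i < N) → ∀ v, pvShape N M v →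
      pvShape N M (is.foldl (fun v i =>
          (PySem.List.pyRange 0 M 1).foldl (fun v j =>
            if pvGGet grid i j = 1 then pvVSet v i j else v) v) v) ∧
      pvCF (is.foldl (fun v i =>
          (PySem.List.pyRange 0 M 1).foldl (fun v j =>
            if pvGGet grid i j = 1 then pvVSet v i j else v) v) v) ≤ pvCF v ∧
      ∀ x y : Int, 0 ≤ x → 0 ≤ y →
        (pvVGet (is.foldl (fun v i =>
            (PySem.List.pyRange 0 M 1).foldl (fun v j =>
              if pvGGet grid i j = 1 then pvVSet v i j else v) v) v) x y = true
          ↔ pvVGet v x y = true ∨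
              (x ∈ is ∧ y ∈ PySem.List.pyRange 0 M 1 ∧ pvGGet grid x y = 1)) := by
    intro is
    induction is with
    | nil => intro _ v hsh; exact ⟨hsh, le_rfl, by simp⟩
    | cons i is ihi =>
      intro his v hsh
      have hi := his i (by simp)
      have his' : ∀ i' ∈ is, 0 ≤ i' ∧ i' < N := fun i' h => his i' (by simp [h])
      simp only [List.foldl_cons]
      obtain ⟨r1, r2, r3⟩ := ihi his'
        ((PySem.List.pyRange 0 M 1).foldl (fun v j =>
          if pvGGet grid i j = 1 then pvVSet v i j else v) v)
        (rowMark_shape N M grid i _ v hsh)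
      refine ⟨r1, le_trans r2 (rowMark_cf N M grid i _ v), ?_⟩
      intro x y hx hy
      rw [r3 x y hx hy,
          rowMark_vget N M grid i hi.1 hi.2 (PySem.List.pyRange 0 M 1) hjsM v hsh x y hx hy]
      constructor
      · rintro ((h | ⟨h1, h2, h3⟩) | ⟨h1, h2, h3⟩)
        · exact Or.inl h
        · exact Or.inr ⟨by simp [h1], h2, by rw [h1]; exact h3⟩
        · exact Or.inr ⟨by simp [h1], h2, h3⟩
      · rintro (h | ⟨h1, h2, h3⟩)
        · exact Or.inl (Or.inl h)
        · rcases List.mem_cons.mp h1 with h1 | h1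
          · exact Or.inl (Or.inr ⟨h1, h2, by rw [← h1]; exact h3⟩)
          · exact Or.inr ⟨h1, h2, h3⟩
  have hisN : ∀ i ∈ PySem.List.pyRange 0 N 1, 0 ≤ i ∧ i < N := by
    intro i hi
    have := PySem.List.mem_pyRange_one.mp hi
    omega
  obtain ⟨r1, r2, r3⟩ := main (PySem.List.pyRange 0 N 1) hisN (pvInitVis N M) hinit
  refine ⟨r1, by rw [pvCF_init] at r2; exact r2, ?_⟩
  intro x y hx hy
  rw [r3 x y hx hy, pvVGet_init]
  simp

theorem frontB_mem (N M : Int) (grid : List (List Int)) (x y : Int) :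
    (x, y) ∈ bfsFrontB N M grid
      ↔ x ∈ PySem.List.pyRange 0 N 1 ∧ y ∈ PySem.List.pyRange 0 M 1 ∧ pvGGet grid x y = 1 := by
  unfold bfsFrontB
  simp only [List.mem_flatMap, List.mem_map, List.mem_filter, beq_iff_eq]
  constructor
  · rintro ⟨i, hi, j, ⟨hj, hg⟩, heq⟩
    obtain ⟨h1, h2⟩ := Prod.mk.injEq .. ▸ heq
    exact ⟨h1 ▸ hi, h2 ▸ hj, by rw [← h1, ← h2]; exact hg⟩
  · rintro ⟨h1, h2, h3⟩
    exact ⟨x, h1, y, ⟨h2, h3⟩, rfl⟩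

theorem frontB_len (N M : Int) (grid : List (List Int)) :
    (bfsFrontB N M grid).length ≤ N.toNat * M.toNat := by
  unfold bfsFrontB
  rw [List.length_flatMap]
  calc ((PySem.List.pyRange 0 N 1).map (fun i =>
          (((PySem.List.pyRange 0 M 1).filter (fun j => pvGGet grid i j == 1)).map
            (fun j => ((i, j) : Int × Int))).length)).sum
      ≤ ((PySem.List.pyRange 0 N 1).map (fun i =>
          (((PySem.List.pyRange 0 M 1).filter (fun j => pvGGet grid i j == 1)).map
            (fun j => ((i, j) : Int × Int))).length)).length • M.toNat := by
        apply List.sum_le_card_nsmul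
        intro x hx
        simp only [List.mem_map] at hx
        obtain ⟨i, _, hx⟩ := hx
        rw [← hx, List.length_map]
        calc ((PySem.List.pyRange 0 M 1).filter (fun j => pvGGet grid i j == 1)).length
            ≤ (PySem.List.pyRange 0 M 1).length := List.length_filter_le _ _
          _ = M.toNat := by rw [PySem.List.length_pyRange_one]; omega
    _ = N.toNat * M.toNat := by
        rw [List.length_map, PySem.List.length_pyRange_one, smul_eq_mul]
        congr 1; omega

-- ===== VERDICT (by name: the statement is the Claim_ definition above) =====
theorem bfs_spec : Claim_equal_bfs := by
  unfold Claim_equal_bfs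
  intro N M grid directions _ _
  unfold Spec_bfs bfs bfs_alt
  simp only
  rw [seedA_split]
  obtain ⟨hsh, hcf, hvget⟩ := seedVis_facts N M grid
  have hrel : pvRel N M
      ((PySem.List.pyRange 0 N 1).foldl (fun v i =>
        (PySem.List.pyRange 0 M 1).foldl (fun v j =>
          if pvGGet grid i j = 1 then pvVSet v i j else v) v) (pvInitVis N M))
      (PySem.Set.ofList (bfsFrontB N M grid)) := by
    intro x y hx0 _ hy0 _
    rw [hvget x y hx0 hy0, PySem.Set.mem_ofList, frontB_mem]
  have hfl := frontB_len N M grid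
  have hmain := mainS N M directions (N.toNat * M.toNat + 1) (bfsFrontB N M grid)
    (N.toNat * M.toNat + (N.toNat * M.toNat + 1)) [] _
    (PySem.Set.ofList (bfsFrontB N M grid)) 0 hsh hrel
    (by simp; omega) (by simp; omega)
  dsimp only
  simp only [List.map_nil, List.append_nil, if_true, Nat.add_sub_cancel] at hmain
  rw [hmain]
  cases hfr : bfsFrontB N M grid with
  | nil => simp [bfsLevelB, bfsLoopB]
  | cons c front => simp [bfsLoopB]
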